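-- pv_equiv track=rewrite | github.com/xmasotto/xsl4a | anki.py | findInsertedDeleted
-- ===== SOURCE A (Python) =====
-- def findInsertedDeleted(new, old):
--     inserted, deleted = [], []
--     lastj = 0
--     for i in range(len(old)):
--         found = False
--         for j in range(lastj, len(new)):
--             if old[i] == new[j]:
--                 found = True
--                 inserted.extend(new[lastj:j])
--                 lastj = j+1
--         if not found:
--             deleted.append(old[i])
--     inserted.extend(new[lastj:])
--     return inserted, deleted
-- ===== SOURCE B (Python) =====
-- def findInsertedDeleted(new, old):
--     # Precompute each value's LAST position in new; one bisect-free pass over old.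
--     last = {}
--     for j, x in enumerate(new):
--         last[x] = j
--     inserted, deleted = [], []
--     lastj = 0
--     for v in old:
--         L = last.get(v, -1)
--         if L >= lastj:
--             inserted.extend(x for x in new[lastj:L] if x != v)
--             lastj = L + 1
--         else:
--             deleted.append(v)
--     inserted.extend(new[lastj:])
--     return inserted, deleted
-- ===== Notes on version B (the rewrite author's own statement) =====
-- stated objective: faster
-- what changed: Replaces A's per-old-element rescans of new (nested loop with repeated slicing) by one precomputed value->last-position dict and a single pass over old that filters each disjoint segment of new once.
import Mathlib
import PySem

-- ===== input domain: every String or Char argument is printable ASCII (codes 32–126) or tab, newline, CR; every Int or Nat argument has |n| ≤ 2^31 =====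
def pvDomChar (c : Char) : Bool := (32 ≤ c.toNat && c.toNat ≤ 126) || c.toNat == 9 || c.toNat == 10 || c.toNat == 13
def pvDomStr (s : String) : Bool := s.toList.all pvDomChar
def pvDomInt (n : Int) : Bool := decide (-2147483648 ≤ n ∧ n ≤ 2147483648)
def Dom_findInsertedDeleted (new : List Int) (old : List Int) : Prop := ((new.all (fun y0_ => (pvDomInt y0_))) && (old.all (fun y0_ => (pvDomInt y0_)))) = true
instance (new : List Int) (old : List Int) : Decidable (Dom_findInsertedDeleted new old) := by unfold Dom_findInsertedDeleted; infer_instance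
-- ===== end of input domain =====

-- B replaces A's nested rescans of `new` by a precomputed value -> last-position dict and one pass over `old` (objective: faster); proved to return the same pair on all inputs.


-- ===== PORT A =====
-- state = (inserted, deleted, lastj); inner loop state = (found, inserted, lastj)
def fidInnerStep (new : List Int) (oi : Int) (s : Bool × List Int × Int) (j : Int) : Bool × List Int × Int :=
  if PySem.List.pyGetD new j 0 = oi then
    (true, s.2.1 ++ PySem.List.slice new (some s.2.2) (some j), j + 1)
  else s

def fidOuterStep (new : List Int) (st : List Int × List Int × Int) (oi : Int) : List Int × List Int × Int :=
  let inner := (PySem.List.pyRange st.2.2 new.length 1).foldl (fidInnerStep new oi) (false, st.1, st.2.2)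
  if inner.1 = false then (inner.2.1, st.2.1 ++ [oi], inner.2.2)
  else (inner.2.1, st.2.1, inner.2.2)

def findInsertedDeleted (new : List Int) (old : List Int) : List Int × List Int :=
  let st := (PySem.List.pyRange 0 old.length 1).foldl
    (fun st i => fidOuterStep new st (PySem.List.pyGetD old i 0)) ([], [], (0 : Int))
  (st.1 ++ PySem.List.slice new (some st.2.2) none, st.2.1)

-- ===== PORT B =====
def fidLast (new : List Int) : PySem.Dict Int Int :=
  (PySem.List.enumerate new 0).foldl (fun d p => d.insert p.2 p.1) PySem.Dict.empty

def fidAltStep (new : List Int) (last : PySem.Dict Int Int) (st : List Int × List Int × Int) (v : Int) : List Int × List Int × Int :=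
  let L := last.getD v (-1)
  if st.2.2 ≤ L then
    (st.1 ++ (PySem.List.slice new (some st.2.2) (some L)).filter (fun x => x ≠ v), st.2.1, L + 1)
  else (st.1, st.2.1 ++ [v], st.2.2)

def findInsertedDeleted_alt (new : List Int) (old : List Int) : List Int × List Int :=
  let last := fidLast new
  let st := old.foldl (fidAltStep new last) ([], [], (0 : Int))
  (st.1 ++ PySem.List.slice new (some st.2.2) none, st.2.1)

-- ===== PRECONDITION & SPEC =====
def Spec_findInsertedDeleted (new : List Int) (old : List Int) (out : List Int × List Int) : Prop := out = findInsertedDeleted_alt new old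
instance (new : List Int) (old : List Int) (out : List Int × List Int) : Decidable (Spec_findInsertedDeleted new old out) := by unfold Spec_findInsertedDeleted; infer_instance

-- ===== CLAIM (what is proved, stated in full; the proofs are below) =====
def Claim_equal_findInsertedDeleted : Prop := ∀ (new : List Int) (old : List Int), Dom_findInsertedDeleted new old → Spec_findInsertedDeleted new old (findInsertedDeleted new old)

-- ===== LEMMAS AND PROOFS =====

-- the index of the last occurrence of v in new (-1 if absent), as B's dict computes it
def fidLastIdx (new : List Int) (v : Int) : Int :=
  (PySem.List.enumerate new 0).foldl (fun acc p => if p.2 = v then p.1 else acc) (-1)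

lemma fidLast_getD_aux (v dflt : Int) (ps : List (Int × Int)) :
    ∀ (d : PySem.Dict Int Int),
    (ps.foldl (fun d p => d.insert p.2 p.1) d).getD v dflt
      = ps.foldl (fun acc p => if p.2 = v then p.1 else acc) (d.getD v dflt) := by
  induction ps with
  | nil => intro d; rfl
  | cons p ps ih =>
    intro d
    rw [List.foldl_cons, List.foldl_cons, ih, PySem.Dict.getD_insert]
    by_cases h : p.2 = v
    · simp [h]
    · simp [h, Ne.symm h]

lemma fidLast_getD (new : List Int) (v : Int) :
    (fidLast new).getD v (-1) = fidLastIdx new v := by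
  unfold fidLast fidLastIdx
  rw [fidLast_getD_aux]
  rfl

lemma fidLastIdx_spec (new : List Int) (v : Int) :
    (fidLastIdx new v = -1 ∧ ∀ (j : Nat) (hj : j < new.length), new[j] ≠ v) ∨
    (∃ (k : Nat) (hk : k < new.length), fidLastIdx new v = (k : Int) ∧ new[k] = v ∧
      ∀ (j : Nat) (hj : j < new.length), k < j → new[j] ≠ v) := by
  induction new using List.reverseRecOn with
  | nil => left; exact ⟨rfl, by simp⟩
  | append_singleton xs y ih =>
    have hstep : fidLastIdx (xs ++ [y]) v = if y = v then (xs.length : Int) else fidLastIdx xs v := by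
      unfold fidLastIdx
      rw [PySem.List.enumerate_append, List.foldl_append]
      simp [PySem.List.enumerate]
    by_cases hy : y = v
    · right
      refine ⟨xs.length, by simp, by rw [hstep]; simp [hy], ?_, ?_⟩
      · simp [hy]
      · intro j hj hgt
        simp at hj; omega
    · rcases ih with ⟨h1, h2⟩ | ⟨k, hk, h1, h2, h3⟩
      · left
        refine ⟨by rw [hstep, if_neg hy, h1], ?_⟩
        intro j hj
        simp at hj
        rcases Nat.lt_or_ge j xs.length with hlt | hge
        · rw [List.getElem_append_left hlt]; exact h2 j hlt
        · have hje : j = xs.length := by omega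
          subst hje
          rw [List.getElem_append_right (le_refl _)]
          simpa using hy
      · right
        refine ⟨k, by simp; omega, by rw [hstep, if_neg hy, h1], ?_, ?_⟩
        · rw [List.getElem_append_left hk]; exact h2
        · intro j hj hgt
          simp at hj
          rcases Nat.lt_or_ge j xs.length with hlt | hge
          · rw [List.getElem_append_left hlt]; exact h3 j hlt hgt
          · have hje : j = xs.length := by omega
            subst hje
            rw [List.getElem_append_right (le_refl _)]
            simpa using hy

-- a segment of new free of v is unchanged by the filter
lemma fid_seg_filter (new : List Int) (v : Int) (l a : Nat)
    (h : ∀ (j : Nat) (hj : j < new.length), l ≤ j → j < a → new[j] ≠ v) :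
    ((new.drop l).take (a - l)).filter (fun x => decide (x ≠ v)) = (new.drop l).take (a - l) := by
  apply List.filter_eq_self.mpr
  intro x hx
  obtain ⟨i, hi, hxi⟩ := List.mem_iff_getElem.mp hx
  have hi' : i < a - l ∧ l + i < new.length := by
    simp [List.length_take, List.length_drop] at hi; omega
  have hx' : x = new[l + i]'hi'.2 := by
    rw [← hxi]
    rw [List.getElem_take, List.getElem_drop]
  have := h (l + i) hi'.2 (by omega) (by omega)
  rw [hx'] at *
  simpa using this

lemma fid_inner_char (new : List Int) (v : Int) :
    ∀ (n a : Nat), new.length - a = n →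
    ∀ (f : Bool) (ins : List Int) (l : Nat), l ≤ a →
    (∀ (j : Nat) (hj : j < new.length), l ≤ j → j < a → new[j] ≠ v) →
    (PySem.List.pyRange (a : Int) (new.length : Int) 1).foldl (fidInnerStep new v) (f, ins, (l : Int)) =
      if (a : Int) ≤ fidLastIdx new v then
        (true, ins ++ ((new.drop l).take ((fidLastIdx new v).toNat - l)).filter (fun x => decide (x ≠ v)),
          fidLastIdx new v + 1)
      else (f, ins, (l : Int)) := by
  intro n
  induction n with
  | zero =>
    intro a ha f ins l hl hseg
    have hna : new.length ≤ a := by omega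
    rw [PySem.List.pyRange_one_eq_nil (by exact_mod_cast hna), List.foldl_nil, if_neg]
    rcases fidLastIdx_spec new v with ⟨h1, _⟩ | ⟨k, hk, h1, _, _⟩
    · rw [h1]; omega
    · rw [h1]; omega
  | succ n ih =>
    intro a ha f ins l hl hseg
    have halt : a < new.length := by omega
    rw [PySem.List.pyRange_one_cons (by exact_mod_cast halt), List.foldl_cons]
    have hget : PySem.List.pyGetD new (a : Int) 0 = new[a] := by
      rw [PySem.List.pyGetD_natCast]
      exact List.getD_eq_getElem _ _ halt
    by_cases hv : new[a] = v
    · -- a matching position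
      have hstep : fidInnerStep new v (f, ins, (l : Int)) (a : Int)
          = (true, ins ++ (new.drop l).take (a - l), ((a : Int) + 1)) := by
        unfold fidInnerStep
        rw [hget, if_pos hv]
        rw [PySem.List.slice_natCast]
      rcases fidLastIdx_spec new v with ⟨h1, h2⟩ | ⟨k, hk, h1, h2, h3⟩
      · exact absurd hv (h2 a halt)
      · have hak : a ≤ k := by
          by_contra hc
          exact (h3 a halt (by omega)) hv
        have hcast : ((a : Int) + 1) = ((a + 1 : Nat) : Int) := by push_cast; ring
        rw [hstep, hcast,
          ih (a + 1) (by omega) true (ins ++ (new.drop l).take (a - l)) (a + 1) le_rfl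
            (by intro j hj h1' h2'; omega)]
        rw [h1]
        rcases Nat.eq_or_lt_of_le hak with hka | hka
        · -- k = a : no further occurrence
          subst hka
          rw [if_neg (by omega), if_pos (by omega)]
          rw [Int.toNat_natCast]
          rw [fid_seg_filter new v l a hseg]
          norm_cast
        · -- a < k : more occurrences ahead
          rw [if_pos (by omega), if_pos (by omega)]
          rw [Int.toNat_natCast]
          have hsplit : (new.drop l).take (k - l)
              = (new.drop l).take (a - l) ++ new[a] :: (new.drop (a + 1)).take (k - (a + 1)) := by
            have h4 : k - l = (a - l) + (k - a) := by omega
            rw [h4, List.take_add, List.drop_drop]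
            have h5 : l + (a - l) = a := by omega
            rw [h5, List.drop_eq_getElem_cons halt]
            rw [show k - a = (k - (a + 1)) + 1 from by omega, List.take_succ_cons]
          rw [hsplit, List.filter_append, List.filter_cons]
          rw [fid_seg_filter new v l a hseg]
          simp [hv]
    · -- not a match: state unchanged
      have hstep : fidInnerStep new v (f, ins, (l : Int)) (a : Int) = (f, ins, (l : Int)) := by
        unfold fidInnerStep
        rw [hget, if_neg (by exact hv)]
      have hcast : ((a : Int) + 1) = ((a + 1 : Nat) : Int) := by push_cast; ring
      rw [hstep, hcast,
        ih (a + 1) (by omega) f ins l (by omega)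
          (by
            intro j hj h1' h2'
            rcases Nat.lt_or_ge j a with hja | hja
            · exact hseg j hj h1' hja
            · have : j = a := by omega
              subst this; exact hv)]
      rcases fidLastIdx_spec new v with ⟨h1, _⟩ | ⟨k, hk, h1, h2, _⟩
      · rw [h1, if_neg (by omega), if_neg (by omega)]
      · have hka : k ≠ a := fun hc => hv (hc ▸ h2)
        rw [h1]
        by_cases hle : (a : Int) ≤ (k : Int)
        · rw [if_pos (by push_cast at hle ⊢; omega), if_pos hle]
        · rw [if_neg (by push_cast at hle ⊢; omega), if_neg hle]

lemma fid_step_eq (new : List Int) (v : Int) (st : List Int × List Int × Int) (h : 0 ≤ st.2.2) :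
    fidOuterStep new st v = fidAltStep new (fidLast new) st v := by
  obtain ⟨ins, del, lastj⟩ := st
  simp only at h
  have hc : ((lastj.toNat : Nat) : Int) = lastj := Int.toNat_of_nonneg h
  unfold fidOuterStep fidAltStep
  rw [fidLast_getD]
  have hchar := fid_inner_char new v (new.length - lastj.toNat) lastj.toNat rfl false ins lastj.toNat
    le_rfl (by intro j hj h1 h2; omega)
  rw [hc] at hchar
  simp only
  rw [hchar]
  by_cases hL : lastj ≤ fidLastIdx new v
  · rw [if_pos hL]
    simp only [if_neg (by simp : ¬ (true = false))]
    rw [if_pos hL, PySem.List.slice_toNat new h (le_trans h hL)]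
  · rw [if_neg hL]
    simp [hL]

lemma fid_altStep_nonneg (new : List Int) (last : PySem.Dict Int Int) (st : List Int × List Int × Int)
    (v : Int) (h : 0 ≤ st.2.2) : 0 ≤ (fidAltStep new last st v).2.2 := by
  unfold fidAltStep
  by_cases hL : st.2.2 ≤ last.getD v (-1)
  · simp only [if_pos hL]; omega
  · simp only [if_neg hL]; exact h

lemma fid_fold_eq (new : List Int) :
    ∀ (old : List Int) (st : List Int × List Int × Int), 0 ≤ st.2.2 →
    old.foldl (fidOuterStep new) st = old.foldl (fidAltStep new (fidLast new)) st := by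
  intro old
  induction old with
  | nil => intro st _; rfl
  | cons v old ih =>
    intro st h
    rw [List.foldl_cons, List.foldl_cons, fid_step_eq new v st h,
      ih _ (fid_altStep_nonneg new (fidLast new) st v h)]

-- ===== VERDICT (by name: the statement is the Claim_ definition above) =====
theorem findInsertedDeleted_spec : Claim_equal_findInsertedDeleted := by
  intro new old _
  unfold Spec_findInsertedDeleted findInsertedDeleted findInsertedDeleted_alt
  simp only
  rw [PySem.List.foldl_pyRange_zero_pyGetD' old 0 (fidOuterStep new) ([], [], 0)]
  rw [fid_fold_eq new old ([], [], 0) (by norm_num)]
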